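-- pv_equiv track=rewrite | github.com/manas-17045/LeetcodeSolutions | Leetcode 3001-3100/3044/3044-2.py | mostFrequentPrime
-- ===== SOURCE A (Python) =====
-- from collections import Counter
--
-- def mostFrequentPrime(mat: list[list[int]]) -> int:
--     """
--     Finds the most frequent prime number formed by concatenating digits in all 8 directions from each cell.
--
--     Args:
--         mat: A 2D list of integers representing the matrix.
--     Returns:
--         The most frequent prime number, or -1 if no prime numbers are found.
--     """
--     m = len(mat)
--     n = len(mat[0])
--     # 8 directions (no (0,0))
--     dirs = [(-1, -1), (-1, 0), (-1, 1), (0, -1), (0, 1), (1, -1), (1, 0), (1, 1)]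
--
--     # Primality test for n (deterministic, fast for n up to ~1e12; here numbers <= 10^6)
--     def is_prime(n: int) -> bool:
--         if n <= 1:
--             return False
--         if n <= 3:
--             return True
--         if n % 2 == 0 or n % 3 == 0:
--             return n in (2, 3)
--         i = 5
--         # Check 6k-1 and 6k+1
--         while i * i <= n:
--             if n % i == 0 or n % (i + 2) == 0:
--                 return False
--             i += 6
--         return True
--
--     prime_cache = {}
--     freq = Counter()
--
--     for i in range(m):
--         for j in range(n):
--             for dx, dy in dirs:
--                 x, y = i, j
--                 num = 0
--                 # Traverse in direction until out of bounds
--                 while 0 <= x < m and 0 <= y < n: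
--                     num = num * 10 + mat[x][y]
--                     if num > 10:
--                         # Cache primality results to avoid repeated checks
--                         p = prime_cache.get(num)
--                         if p is None:
--                             p = is_prime(num)
--                             prime_cache[num] = p
--                         if p:
--                             freq[num] += 1
--                     x += dx
--                     y += dy
--
--     if not freq:
--         return -1
--
--     # Find prime(s) with max frequency, tie-breaker: largest prime
--     max_freq = max(freq.values())
--     # Filter keys with that freq and take the maximum key
--     candidates = [num for num, c in freq.items() if c == max_freq]
--     return max(candidates)
-- ===== SOURCE B (Python) =====
-- def _is_prime(n: int) -> bool:
--     if n <= 1: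
--         return False
--     if n <= 3:
--         return True
--     if n % 2 == 0 or n % 3 == 0:
--         return n in (2, 3)
--     i = 5
--     while i * i <= n:
--         if n % i == 0 or n % (i + 2) == 0:
--             return False
--         i += 6
--     return True
--
-- def mostFrequentPrime(mat: list[list[int]]) -> int:
--     m, n = len(mat), len(mat[0])
--     counts = {}
--     # Level-by-level dynamic programming: for each direction, cur maps a cell to the
--     # value of the length-L segment starting there; each round extends every live
--     # segment by one step at its START using value = mat[i][j] * 10**L + cur[next].
--     for dx, dy in ((-1, -1), (-1, 0), (-1, 1), (0, -1), (0, 1), (1, -1), (1, 0), (1, 1)):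
--         cur = {(i, j): mat[i][j] for i in range(m) for j in range(n)}
--         pow10 = 1
--         while cur:
--             for v in cur.values():
--                 if v > 10:
--                     counts[v] = counts.get(v, 0) + 1
--             pow10 *= 10
--             cur = {(i, j): mat[i][j] * pow10 + cur[(i + dx, j + dy)]
--                    for (i, j) in cur if (i + dx, j + dy) in cur}
--     # Single selection pass: lexicographic maximum of (frequency, value) among primes.
--     best, best_freq = -1, 0
--     for v, c in counts.items():
--         if _is_prime(v) and (c > best_freq or (c == best_freq and v > best)):
--             best, best_freq = v, c
--     return best
-- ===== Notes on version B (the rewrite author's own statement) =====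
-- stated objective: alternative
-- what changed: A walks an inner while-loop ray from every cell in each of 8 directions, testing primality (with a cache) as each number is built and counting only primes; B never walks rays: per direction it runs a level-by-level dynamic program on a dict mapping each cell to the value of the length-L segment starting there, extending all live segments at once by value = mat[i][j]*10**L + cur[next], counts every value > 10, and afterwards selects by one lexicographic (frequency, value) pass over the distinct values testing primality once per value.
import Mathlib
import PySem

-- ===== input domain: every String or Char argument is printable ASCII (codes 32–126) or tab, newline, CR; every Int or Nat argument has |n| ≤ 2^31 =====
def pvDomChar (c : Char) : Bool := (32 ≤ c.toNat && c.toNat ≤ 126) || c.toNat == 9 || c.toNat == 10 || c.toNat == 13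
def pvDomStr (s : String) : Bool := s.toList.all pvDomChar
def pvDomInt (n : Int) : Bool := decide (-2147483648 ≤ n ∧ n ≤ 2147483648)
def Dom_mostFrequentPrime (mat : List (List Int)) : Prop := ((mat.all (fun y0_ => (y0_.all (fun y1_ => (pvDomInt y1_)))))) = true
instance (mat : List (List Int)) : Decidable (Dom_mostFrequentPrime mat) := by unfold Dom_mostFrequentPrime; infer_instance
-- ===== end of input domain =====

-- B replaces A's per-cell 8-direction while-loop walks (with an interleaved cached
-- primality test) by a per-direction level-by-level dynamic program on a dict of live
-- segments extended via powers of ten, counting every value and filtering by primality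
-- only in one final selection pass; same cost class. Return values proved equal.


-- ===== PORT A =====
-- is_prime's 6k±1 trial loop (shared helper: Source B carries the same is_prime code)
def isPrimeLoop (n i : Int) : Bool :=
  if h : i * i ≤ n then
    if PySem.Int.mod n i == 0 || PySem.Int.mod n (i + 2) == 0 then false
    else isPrimeLoop n (i + 6)
  else true
termination_by (n + 1 - i).toNat
decreasing_by
  have hii : i ≤ i * i := by
    by_cases h0 : i ≤ 0
    · exact le_trans h0 (mul_self_nonneg i)
    · nlinarith
  omega

def isPrime (n : Int) : Bool :=
  if n ≤ 1 then false
  else if n ≤ 3 then true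
  else if PySem.Int.mod n 2 == 0 || PySem.Int.mod n 3 == 0 then (n == 2 || n == 3)
  else isPrimeLoop n 5

def dirsA : List (Int × Int) :=
  [(-1, -1), (-1, 0), (-1, 1), (0, -1), (0, 1), (1, -1), (1, 0), (1, 1)]

-- A's inner while loop: walk in direction (dx,dy), threading the primality cache and
-- the Counter freq.  fuel bounds the walk (always sufficient: each step moves one
-- coordinate monotonically, so at most m+n in-bounds iterations happen).
def walkA (mat : List (List Int)) (m n dx dy : Int) :
    Nat → Int → Int → Int → PySem.Dict Int Bool → PySem.Dict Int Int →
    PySem.Dict Int Bool × PySem.Dict Int Int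
  | 0, _, _, _, cache, freq => (cache, freq)
  | fuel + 1, x, y, num, cache, freq =>
    if 0 ≤ x ∧ x < m ∧ 0 ≤ y ∧ y < n then
      match PySem.List.pyGet? mat x with
      | none => (cache, freq)
      | some row =>
        match PySem.List.pyGet? row y with
        | none => (cache, freq)
        | some v =>
          let num' := num * 10 + v
          if num' > 10 then
            match cache.get? num' with
            | some p =>
              walkA mat m n dx dy fuel (x + dx) (y + dy) num' cache
                (if p then freq.modify num' 0 (· + 1) else freq)
            | none =>
              let p := isPrime num'
              walkA mat m n dx dy fuel (x + dx) (y + dy) num' (cache.insert num' p)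
                (if p then freq.modify num' 0 (· + 1) else freq)
          else
            walkA mat m n dx dy fuel (x + dx) (y + dy) num' cache freq
    else (cache, freq)

def mostFrequentPrime (mat : List (List Int)) : Int :=
  let m : Int := (mat.length : Int)
  let row0 : List Int := (PySem.List.pyGet? mat 0).getD []
  let n : Int := (row0.length : Int)
  let fuel : Nat := mat.length + row0.length + 1
  let res :=
    (PySem.List.pyRange 0 m 1).foldl (fun st i =>
      (PySem.List.pyRange 0 n 1).foldl (fun st j =>
        dirsA.foldl (fun st d =>
          walkA mat m n d.1 d.2 fuel i j 0 st.1 st.2) st) st)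
      (PySem.Dict.empty, PySem.Dict.empty)
  let freq := res.2
  if freq.items.isEmpty then -1
  else
    match PySem.List.max? freq.values (fun v => v) with
    | none => -1
    | some mf =>
      match PySem.List.max? ((freq.items.filter (fun kc => kc.2 == mf)).map (·.1)) (fun v => v) with
      | some r => r
      | none => -1

-- ===== PORT B =====
-- mat[i][j] (only reached with (i,j) inside the grid under Pre_)
def matAt (mat : List (List Int)) (i j : Int) : Int :=
  (PySem.List.pyGet? ((PySem.List.pyGet? mat i).getD []) j).getD 0

-- {(i, j): mat[i][j] for i in range(m) for j in range(n)}
def initCur (mat : List (List Int)) (m n : Int) : PySem.Dict (Int × Int) Int :=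
  (PySem.List.pyRange 0 m 1).foldl (fun d i =>
    (PySem.List.pyRange 0 n 1).foldl (fun d j =>
      d.insert (i, j) (matAt mat i j)) d) PySem.Dict.empty

-- {(i,j): mat[i][j]*pow10 + cur[(i+dx,j+dy)] for (i,j) in cur if (i+dx,j+dy) in cur}
def stepCur (mat : List (List Int)) (dx dy pow10 : Int)
    (cur : PySem.Dict (Int × Int) Int) : PySem.Dict (Int × Int) Int :=
  cur.items.foldl (fun d kv =>
    match cur.get? (kv.1.1 + dx, kv.1.2 + dy) with
    | some w => d.insert kv.1 (matAt mat kv.1.1 kv.1.2 * pow10 + w)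
    | none => d) PySem.Dict.empty

-- the while-cur loop: harvest values > 10, then extend every live segment one level
def loopB (mat : List (List Int)) (dx dy : Int) :
    Nat → Int → PySem.Dict (Int × Int) Int → PySem.Dict Int Int → PySem.Dict Int Int
  | 0, _, _, counts => counts
  | fuel + 1, pow10, cur, counts =>
    if cur.items.isEmpty then counts
    else
      loopB mat dx dy fuel (pow10 * 10) (stepCur mat dx dy (pow10 * 10) cur)
        (cur.values.foldl (fun c v => if v > 10 then c.modify v 0 (· + 1) else c) counts)

-- final selection pass: lexicographic (frequency, value) maximum among primes
def selB : List (Int × Int) → Int → Int → Int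
  | [], best, _ => best
  | (k, c) :: rest, best, bestf =>
    if isPrime k && (decide (c > bestf) || (c == bestf && decide (k > best))) then
      selB rest k c
    else
      selB rest best bestf

def mostFrequentPrime_alt (mat : List (List Int)) : Int :=
  let m : Int := (mat.length : Int)
  let row0 : List Int := (PySem.List.pyGet? mat 0).getD []
  let n : Int := (row0.length : Int)
  let fuel : Nat := mat.length * row0.length + 1
  let counts := dirsA.foldl (fun counts d =>
      loopB mat d.1 d.2 fuel 1 (initCur mat m n) counts) PySem.Dict.empty
  selB counts.items (-1) 0

-- ===== PRECONDITION & SPEC =====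
-- Pre_ excludes exactly the inputs where the Python A raises IndexError: the empty
-- matrix (mat[0]) and ragged matrices with a row shorter than row 0 (mat[x][y]).
def Pre_mostFrequentPrime (mat : List (List Int)) : Prop :=
  mat ≠ [] ∧ ∀ row ∈ mat, (mat.headD []).length ≤ row.length
instance (mat : List (List Int)) : Decidable (Pre_mostFrequentPrime mat) := by
  unfold Pre_mostFrequentPrime; infer_instance

def pvWitness_mostFrequentPrime : List (List Int) := [[1, 3], [7, 9]]

def Spec_mostFrequentPrime (mat : List (List Int)) (out : Int) : Prop := out = mostFrequentPrime_alt mat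
instance (mat : List (List Int)) (out : Int) : Decidable (Spec_mostFrequentPrime mat out) := by unfold Spec_mostFrequentPrime; infer_instance

-- ===== CLAIM (what is proved, stated in full; the proofs are below) =====
def Claim_equal_mostFrequentPrime : Prop := ∀ (mat : List (List Int)), Dom_mostFrequentPrime mat → Pre_mostFrequentPrime mat → Spec_mostFrequentPrime mat (mostFrequentPrime mat)

-- ===== LEMMAS AND PROOFS =====

-- the ray of matrix values from (x,y) in direction (dx,dy), proof-side notion
def rayB (mat : List (List Int)) (m n dx dy : Int) : Nat → Int → Int → List Int
  | 0, _, _ => []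
  | fuel + 1, x, y =>
    if 0 ≤ x ∧ x < m ∧ 0 ≤ y ∧ y < n then
      match PySem.List.pyGet? mat x with
      | none => []
      | some row =>
        match PySem.List.pyGet? row y with
        | none => []
        | some v => v :: rayB mat m n dx dy fuel (x + dx) (y + dy)
    else []

-- the list of running concatenation values along a ray
def prefixNums : Int → List Int → List Int
  | _, [] => []
  | num, v :: ds => (num * 10 + v) :: prefixNums (num * 10 + v) ds

-- cache correctness invariant for A's prime_cache
def InvC (c : PySem.Dict Int Bool) : Prop := ∀ k p, c.get? k = some p → p = isPrime k

-- the whole generated sequence of concatenation values > 10, in A's traversal order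
def bigSeq (mat : List (List Int)) (m n : Int) (fuel : Nat) : List Int :=
  (PySem.List.pyRange 0 m 1).flatMap (fun i =>
    (PySem.List.pyRange 0 n 1).flatMap (fun j =>
      dirsA.flatMap (fun d =>
        (prefixNums 0 (rayB mat m n d.1 d.2 fuel i j)).filter (fun v => decide (v > 10)))))

-- ---- abbreviations for the common quantities ----
def rowZ (mat : List (List Int)) : List Int := (PySem.List.pyGet? mat 0).getD []
def mI (mat : List (List Int)) : Int := (mat.length : Int)
def nI (mat : List (List Int)) : Int := ((rowZ mat).length : Int)
def fF (mat : List (List Int)) : Nat := mat.length + (rowZ mat).length + 1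
def kK (mat : List (List Int)) : Nat := mat.length * (rowZ mat).length + 1

def rayOf (mat : List (List Int)) (dx dy : Int) (c : Int × Int) : List Int :=
  rayB mat (mI mat) (nI mat) dx dy (fF mat) c.1 c.2

def segVal (ds : List Int) (L : Nat) : Int :=
  (ds.take (L + 1)).foldl (fun a v => a * 10 + v) 0

def cellsRM (mat : List (List Int)) : List (Int × Int) :=
  (PySem.List.pyRange 0 (mI mat) 1).flatMap (fun i =>
    (PySem.List.pyRange 0 (nI mat) 1).map (fun j => (i, j)))

def actCells (mat : List (List Int)) (dx dy : Int) (L : Nat) : List (Int × Int) :=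
  (cellsRM mat).filter (fun c => decide (L < (rayOf mat dx dy c).length))

-- iterates of the DP from a given level dict (peeling from the front)
def iterFrom (mat : List (List Int)) (dx dy : Int) :
    Nat → Int → PySem.Dict (Int × Int) Int → PySem.Dict (Int × Int) Int
  | 0, _, cur => cur
  | L + 1, pow, cur => iterFrom mat dx dy L (pow * 10) (stepCur mat dx dy (pow * 10) cur)

-- the sequence of values the while-loop harvests
def seqOf (mat : List (List Int)) (dx dy : Int) :
    Nat → Int → PySem.Dict (Int × Int) Int → List Int
  | 0, _, _ => []
  | fuel + 1, pow, cur =>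
    if cur.items.isEmpty then []
    else (cur.values.filter (fun v => decide (v > 10))) ++
      seqOf mat dx dy fuel (pow * 10) (stepCur mat dx dy (pow * 10) cur)

-- the multiset contribution of one (cell, direction, level) triple
def indM (mat : List (List Int)) (dx dy : Int) (c : Int × Int) (L : Nat) : Multiset Int :=
  if L < (rayOf mat dx dy c).length ∧ segVal (rayOf mat dx dy c) L > 10
  then {segVal (rayOf mat dx dy c) L} else 0

def msum {α : Type} (l : List α) (f : α → Multiset Int) : Multiset Int := (l.map f).sum

-- ---- direction bookkeeping ----
def muD (m n dx x dy y : Int) : Int :=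
  if dx = 1 then m - x else if dx = -1 then x + 1 else if dy = 1 then n - y else y + 1

def DirOK (dx dy : Int) : Prop :=
  (dx = -1 ∨ dx = 0 ∨ dx = 1) ∧ (dy = -1 ∨ dy = 0 ∨ dy = 1) ∧ ¬(dx = 0 ∧ dy = 0)

theorem dir_shape {dx dy : Int} (h : (dx, dy) ∈ dirsA) : DirOK dx dy := by
  simp only [dirsA, List.mem_cons, List.not_mem_nil, or_false, Prod.mk.injEq] at h
  unfold DirOK
  rcases h with ⟨h1, h2⟩ | ⟨h1, h2⟩ | ⟨h1, h2⟩ | ⟨h1, h2⟩ | ⟨h1, h2⟩ | ⟨h1, h2⟩ | ⟨h1, h2⟩ | ⟨h1, h2⟩ <;>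
    subst h1 <;> subst h2 <;> refine ⟨by omega, by omega, by omega⟩

theorem mu_pos {m n dx x dy y : Int} (hd : DirOK dx dy)
    (hb : 0 ≤ x ∧ x < m ∧ 0 ≤ y ∧ y < n) : 1 ≤ muD m n dx x dy y := by
  obtain ⟨hdx, hdy, hnz⟩ := hd
  unfold muD
  split_ifs <;> omega

theorem mu_le {m n dx x dy y : Int} (hd : DirOK dx dy)
    (hb : 0 ≤ x ∧ x < m ∧ 0 ≤ y ∧ y < n) : muD m n dx x dy y ≤ m + n := by
  obtain ⟨hdx, hdy, hnz⟩ := hd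
  unfold muD
  split_ifs <;> omega

theorem mu_step {m n dx x dy y : Int} (hd : DirOK dx dy) :
    muD m n dx (x + dx) dy (y + dy) = muD m n dx x dy y - 1 := by
  obtain ⟨hdx, hdy, hnz⟩ := hd
  unfold muD
  rcases hdx with h | h | h <;> rcases hdy with h' | h' | h' <;> subst h <;> subst h' <;>
    simp <;> omega

theorem rayB_len_le (mat : List (List Int)) (m n dx dy : Int) (hd : DirOK dx dy) :
    ∀ (fuel : Nat) (x y : Int),
      (rayB mat m n dx dy fuel x y).length ≤ (muD m n dx x dy y).toNat := by
  intro fuel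
  induction fuel with
  | zero => intro x y; simp [rayB]
  | succ fuel ih =>
    intro x y
    by_cases hb : 0 ≤ x ∧ x < m ∧ 0 ≤ y ∧ y < n
    · have hmu1 := mu_pos hd hb
      have hstep := mu_step (m := m) (n := n) (x := x) (y := y) hd
      cases hrow : PySem.List.pyGet? mat x with
      | none => simp [rayB, hb, hrow]
      | some row =>
        cases hv : PySem.List.pyGet? row y with
        | none => simp [rayB, hb, hrow, hv]
        | some v =>
          simp only [rayB, if_pos hb, hrow, hv, List.length_cons]
          have := ih (x + dx) (y + dy)
          rw [hstep] at this
          omega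
    · simp [rayB, hb]

theorem rayB_stable (mat : List (List Int)) (m n dx dy : Int) :
    ∀ (fuel : Nat) (x y : Int), (rayB mat m n dx dy fuel x y).length < fuel →
      rayB mat m n dx dy (fuel + 1) x y = rayB mat m n dx dy fuel x y := by
  intro fuel
  induction fuel with
  | zero => intro x y h; simp [rayB] at h
  | succ fuel ih =>
    intro x y h
    by_cases hb : 0 ≤ x ∧ x < m ∧ 0 ≤ y ∧ y < n
    · cases hrow : PySem.List.pyGet? mat x with
      | none => simp [rayB, hb, hrow]
      | some row =>
        cases hv : PySem.List.pyGet? row y with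
        | none => simp [rayB, hb, hrow, hv]
        | some v =>
          have h' : (rayB mat m n dx dy fuel (x + dx) (y + dy)).length < fuel := by
            have hlen : rayB mat m n dx dy (fuel + 1) x y =
                v :: rayB mat m n dx dy fuel (x + dx) (y + dy) := by
              conv_lhs => rw [rayB]
              simp only [if_pos hb, hrow, hv]
            rw [hlen] at h
            simpa using h
          conv_lhs => rw [rayB]
          conv_rhs => rw [rayB]
          simp only [if_pos hb, hrow, hv]
          rw [ih (x + dx) (y + dy) h']
    · simp [rayB, hb]

-- ---- grid / ray facts ----
theorem rowZ_eq_headD (mat : List (List Int)) (hne : mat ≠ []) :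
    rowZ mat = mat.headD [] := by
  cases mat with
  | nil => exact absurd rfl hne
  | cons a t => simp [rowZ]

theorem ray_cons (mat : List (List Int)) (hP : Pre_mostFrequentPrime mat)
    {dx dy : Int} (hd : DirOK dx dy) {c : Int × Int}
    (hb : 0 ≤ c.1 ∧ c.1 < mI mat ∧ 0 ≤ c.2 ∧ c.2 < nI mat) :
    rayOf mat dx dy c = matAt mat c.1 c.2 :: rayOf mat dx dy (c.1 + dx, c.2 + dy) := by
  obtain ⟨hne, hrect⟩ := hP
  obtain ⟨hx0, hxm, hy0, hyn⟩ := hb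
  have hxlen : c.1.toNat < mat.length := by
    have : (mat.length : Int) = mI mat := rfl
    omega
  have hrow : PySem.List.pyGet? mat c.1 = some mat[c.1.toNat] :=
    PySem.List.pyGet?_eq_some_getElem mat hx0 (by exact_mod_cast hxm)
  have hrowlen : (rowZ mat).length ≤ mat[c.1.toNat].length := by
    rw [rowZ_eq_headD mat hne]
    exact hrect _ (List.getElem_mem hxlen)
  have hylen : c.2.toNat < mat[c.1.toNat].length := by
    have h1 : ((rowZ mat).length : Int) = nI mat := rfl
    omega
  have hv : PySem.List.pyGet? mat[c.1.toNat] c.2 = some mat[c.1.toNat][c.2.toNat] :=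
    PySem.List.pyGet?_eq_some_getElem mat[c.1.toNat] hy0 (by omega)
  have hmatAt : matAt mat c.1 c.2 = mat[c.1.toNat][c.2.toNat] := by
    simp [matAt, hrow, hv]
  have hS : 1 ≤ mat.length + (rowZ mat).length := by
    cases mat with
    | nil => exact absurd rfl hne
    | cons a t => simp; omega
  -- one unfold of the ray at full fuel
  have hunf : rayOf mat dx dy c =
      mat[c.1.toNat][c.2.toNat] ::
        rayB mat (mI mat) (nI mat) dx dy (mat.length + (rowZ mat).length) (c.1 + dx) (c.2 + dy) := by
    unfold rayOf fF
    conv_lhs => rw [rayB]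
    rw [if_pos (⟨hx0, hxm, hy0, hyn⟩ : 0 ≤ c.1 ∧ c.1 < mI mat ∧ 0 ≤ c.2 ∧ c.2 < nI mat)]
    simp only [hrow, hv]
  -- fuel stability for the tail
  have hmuc : muD (mI mat) (nI mat) dx c.1 dy c.2 ≤ mI mat + nI mat :=
    mu_le hd ⟨hx0, hxm, hy0, hyn⟩
  have hmun : muD (mI mat) (nI mat) dx (c.1 + dx) dy (c.2 + dy)
      = muD (mI mat) (nI mat) dx c.1 dy c.2 - 1 := mu_step hd
  have hlen : (rayB mat (mI mat) (nI mat) dx dy (mat.length + (rowZ mat).length)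
      (c.1 + dx) (c.2 + dy)).length < mat.length + (rowZ mat).length := by
    have h1 := rayB_len_le mat (mI mat) (nI mat) dx dy hd
      (mat.length + (rowZ mat).length) (c.1 + dx) (c.2 + dy)
    have hcast : mI mat + nI mat = ((mat.length + (rowZ mat).length : Nat) : Int) := by
      simp [mI, nI]
    omega
  have hstab := rayB_stable mat (mI mat) (nI mat) dx dy
    (mat.length + (rowZ mat).length) (c.1 + dx) (c.2 + dy) hlen
  rw [hunf, ← hmatAt]
  unfold rayOf fF
  rw [← hstab]

theorem ray_out_nil (mat : List (List Int)) {dx dy : Int} {c : Int × Int}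
    (hb : ¬(0 ≤ c.1 ∧ c.1 < mI mat ∧ 0 ≤ c.2 ∧ c.2 < nI mat)) :
    rayOf mat dx dy c = [] := by
  unfold rayOf fF
  rw [rayB]
  simp [hb]

theorem ray_len_pos (mat : List (List Int)) (hP : Pre_mostFrequentPrime mat)
    {dx dy : Int} (hd : DirOK dx dy) {c : Int × Int}
    (hb : 0 ≤ c.1 ∧ c.1 < mI mat ∧ 0 ≤ c.2 ∧ c.2 < nI mat) :
    0 < (rayOf mat dx dy c).length := by
  rw [ray_cons mat hP hd hb]; simp

theorem ray_len_le_K (mat : List (List Int)) {dx dy : Int} (hd : DirOK dx dy)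
    {c : Int × Int} (hb : 0 ≤ c.1 ∧ c.1 < mI mat ∧ 0 ≤ c.2 ∧ c.2 < nI mat) :
    (rayOf mat dx dy c).length ≤ mat.length * (rowZ mat).length := by
  have h1 := rayB_len_le mat (mI mat) (nI mat) dx dy hd (fF mat) c.1 c.2
  have hm1 : 1 ≤ mI mat := by obtain ⟨h, _, _, _⟩ := hb; omega
  have hn1 : 1 ≤ nI mat := by obtain ⟨_, _, h, h'⟩ := hb; omega
  have hmu : muD (mI mat) (nI mat) dx c.1 dy c.2 ≤ mI mat * nI mat := by
    have hmn : mI mat ≤ mI mat * nI mat := le_mul_of_one_le_right (by omega) hn1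
    have hnm : nI mat ≤ mI mat * nI mat := le_mul_of_one_le_left (by omega) hm1
    obtain ⟨hdx, hdy, hnz⟩ := hd
    unfold muD
    obtain ⟨hx0, hxm, hy0, hyn⟩ := hb
    split_ifs <;> omega
  have hcast : mI mat * nI mat = ((mat.length * (rowZ mat).length : Nat) : Int) := by
    simp [mI, nI]
  have : (rayOf mat dx dy c).length ≤ (muD (mI mat) (nI mat) dx c.1 dy c.2).toNat := h1
  omega

theorem mem_cellsRM {mat : List (List Int)} {c : Int × Int} :
    c ∈ cellsRM mat ↔ 0 ≤ c.1 ∧ c.1 < mI mat ∧ 0 ≤ c.2 ∧ c.2 < nI mat := by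
  unfold cellsRM
  simp only [List.mem_flatMap, List.mem_map, PySem.List.mem_pyRange_one]
  constructor
  · rintro ⟨i, hi, j, hj, rfl⟩
    exact ⟨hi.1, hi.2, hj.1, hj.2⟩
  · rintro ⟨h1, h2, h3, h4⟩
    exact ⟨c.1, ⟨h1, h2⟩, c.2, ⟨h3, h4⟩, rfl⟩

theorem nodup_cellsRM (mat : List (List Int)) : (cellsRM mat).Nodup := by
  unfold cellsRM
  rw [List.nodup_flatMap]
  constructor
  · intro i _
    exact (PySem.List.nodup_pyRange_one 0 (nI mat)).map (fun a b h => by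
      simpa using congrArg Prod.snd h)
  · have hnd := PySem.List.nodup_pyRange_one 0 (mI mat)
    refine List.Pairwise.imp ?_ (List.Nodup.pairwise_of_forall_ne hnd (fun a _ b _ h => h))
    intro a b hab c hca hcb
    simp only [List.mem_map] at hca hcb
    obtain ⟨j1, _, rfl⟩ := hca
    obtain ⟨j2, _, h2⟩ := hcb
    exact hab (by simpa using congrArg Prod.fst h2.symm)

-- ---- the initial level dict ----
theorem init_aux (mat : List (List Int)) (n : Int) :
    ∀ (is : List Int) (d : PySem.Dict (Int × Int) Int),
      (∀ i ∈ is, ∀ j : Int, d.contains (i, j) = false) → is.Nodup →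
      (is.foldl (fun d i => (PySem.List.pyRange 0 n 1).foldl
          (fun d j => d.insert (i, j) (matAt mat i j)) d) d).items
        = d.items ++ is.flatMap (fun i =>
            (PySem.List.pyRange 0 n 1).map (fun j => ((i, j), matAt mat i j))) := by
  intro is
  induction is with
  | nil => intro d _ _; simp
  | cons i t ih =>
    intro d hfresh hnd
    simp only [List.foldl_cons, List.flatMap_cons]
    have hmapnd : ((PySem.List.pyRange 0 n 1).map (fun j => ((i, j) : Int × Int))).Nodup :=
      (PySem.List.nodup_pyRange_one 0 n).map (fun a b h => by simpa using congrArg Prod.snd h)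
    have hinner := PySem.Dict.items_foldl_insert_fresh (PySem.List.pyRange 0 n 1)
        (fun j => ((i, j) : Int × Int)) (fun j => matAt mat i j) d
        (fun j _ => hfresh i List.mem_cons_self j) hmapnd
    have hkeys := PySem.Dict.keys_foldl_insert_key (PySem.List.pyRange 0 n 1)
        (fun j => ((i, j) : Int × Int)) (fun _ j => matAt mat i j) d
    have hfresh' : ∀ i' ∈ t, ∀ j : Int,
        ((PySem.List.pyRange 0 n 1).foldl
          (fun d j => d.insert (i, j) (matAt mat i j)) d).contains (i', j) = false := by
      intro i' hi' j
      rw [PySem.Dict.contains_eq_decide_mem_keys, hkeys]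
      have h1 : (i', j) ∉ d.keys := by
        have := hfresh i' (List.mem_cons_of_mem _ hi') j
        rw [PySem.Dict.contains_eq_decide_mem_keys] at this
        simpa using this
      have h2 : (i', j) ∉ (PySem.List.pyRange 0 n 1).map (fun j => ((i, j) : Int × Int)) := by
        intro hmem
        simp only [List.mem_map] at hmem
        obtain ⟨j', _, hj'⟩ := hmem
        have : i = i' := by simpa using congrArg Prod.fst hj'
        exact (List.nodup_cons.mp hnd).1 (this ▸ hi')
      simp [PySem.Set.mem_update, h1, h2]
    rw [ih _ hfresh' (List.nodup_cons.mp hnd).2, hinner, List.append_assoc]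

theorem initCur_items (mat : List (List Int)) :
    (initCur mat (mI mat) (nI mat)).items
      = (cellsRM mat).map (fun c => (c, matAt mat c.1 c.2)) := by
  unfold initCur cellsRM
  rw [init_aux mat (nI mat) _ PySem.Dict.empty
    (fun i _ j => PySem.Dict.contains_empty _) (PySem.List.nodup_pyRange_one 0 (mI mat))]
  rw [List.map_flatMap]
  simp only [List.map_map, Function.comp_def]
  rfl

-- ---- step of the DP ----
theorem stepCur_foldl_eq (mat : List (List Int)) (dx dy p : Int)
    (cur : PySem.Dict (Int × Int) Int) :
    ∀ (l : List ((Int × Int) × Int)) (d : PySem.Dict (Int × Int) Int),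
      (l.foldl (fun d kv =>
        match cur.get? (kv.1.1 + dx, kv.1.2 + dy) with
        | some w => d.insert kv.1 (matAt mat kv.1.1 kv.1.2 * p + w)
        | none => d) d)
      = ((l.filter (fun kv => (cur.get? (kv.1.1 + dx, kv.1.2 + dy)).isSome)).foldl
          (fun d kv => d.insert kv.1
            (matAt mat kv.1.1 kv.1.2 * p + (cur.get? (kv.1.1 + dx, kv.1.2 + dy)).getD 0)) d) := by
  intro l
  induction l with
  | nil => intro d; rfl
  | cons kv t ih =>
    intro d
    simp only [List.foldl_cons, List.filter_cons]
    cases hw : cur.get? (kv.1.1 + dx, kv.1.2 + dy) with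
    | none => simp only [Option.isSome_none]; exact ih d
    | some w => simp only [hw, Option.isSome_some, if_true, List.foldl_cons, Option.getD_some]; exact ih _

theorem stepCur_empty (mat : List (List Int)) (dx dy p : Int) :
    stepCur mat dx dy p PySem.Dict.empty = PySem.Dict.empty := rfl

theorem iterFrom_empty (mat : List (List Int)) (dx dy : Int) :
    ∀ (L : Nat) (pow : Int), iterFrom mat dx dy L pow PySem.Dict.empty = PySem.Dict.empty := by
  intro L
  induction L with
  | zero => intro pow; rfl
  | succ L ih => intro pow; simp only [iterFrom, stepCur_empty]; exact ih _

theorem iterFrom_succ_right (mat : List (List Int)) (dx dy : Int) :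
    ∀ (L : Nat) (pow : Int) (cur : PySem.Dict (Int × Int) Int),
      iterFrom mat dx dy (L + 1) pow cur
        = stepCur mat dx dy (pow * 10 ^ (L + 1)) (iterFrom mat dx dy L pow cur) := by
  intro L
  induction L with
  | zero => intro pow cur; simp only [iterFrom]; norm_num
  | succ L ih =>
    intro pow cur
    have h1 : iterFrom mat dx dy (L + 1 + 1) pow cur
        = iterFrom mat dx dy (L + 1) (pow * 10) (stepCur mat dx dy (pow * 10) cur) := rfl
    rw [h1, ih]
    have h2 : iterFrom mat dx dy (L + 1) pow cur
        = iterFrom mat dx dy L (pow * 10) (stepCur mat dx dy (pow * 10) cur) := rfl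
    rw [h2]
    ring_nf

-- ---- segment values ----
theorem fold_shift : ∀ (ds : List Int) (a : Int),
    ds.foldl (fun x v => x * 10 + v) a
      = a * 10 ^ ds.length + ds.foldl (fun x v => x * 10 + v) 0 := by
  intro ds
  induction ds with
  | nil => intro a; simp
  | cons v t ih =>
    intro a
    simp only [List.foldl_cons, List.length_cons]
    rw [ih (a * 10 + v), ih (0 * 10 + v)]
    ring

theorem segVal_zero (v : Int) (t : List Int) : segVal (v :: t) 0 = v := by
  simp [segVal]

theorem segVal_succ (v : Int) (t : List Int) (L : Nat) (h : L < t.length) :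
    segVal (v :: t) (L + 1) = v * 10 ^ (L + 1) + segVal t L := by
  unfold segVal
  simp only [List.take_succ_cons, List.foldl_cons]
  rw [fold_shift (t.take (L + 1)) (0 * 10 + v)]
  have hlen : (t.take (L + 1)).length = L + 1 := by
    rw [List.length_take]; omega
  rw [hlen]
  ring

-- ---- the level-L dict of the DP ----
theorem iter_items (mat : List (List Int)) (hP : Pre_mostFrequentPrime mat)
    {dx dy : Int} (hd : DirOK dx dy) :
    ∀ L : Nat, (iterFrom mat dx dy L 1 (initCur mat (mI mat) (nI mat))).items
      = (actCells mat dx dy L).map (fun c => (c, segVal (rayOf mat dx dy c) L)) := by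
  intro L
  induction L with
  | zero =>
    have hfil : actCells mat dx dy 0 = cellsRM mat := by
      apply List.filter_eq_self.mpr
      intro c hc
      have hb := mem_cellsRM.mp hc
      simpa using ray_len_pos mat hP hd hb
    show (initCur mat (mI mat) (nI mat)).items = _
    rw [initCur_items, hfil]
    apply List.map_congr_left
    intro c hc
    have hb := mem_cellsRM.mp hc
    rw [ray_cons mat hP hd hb, segVal_zero]
  | succ L ih =>
    set cur := iterFrom mat dx dy L 1 (initCur mat (mI mat) (nI mat)) with hcur
    have hkeys : cur.keys = actCells mat dx dy L := by
      show cur.items.map (·.1) = _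
      rw [ih, List.map_map]
      have hco : ((·.1) ∘ fun c => (c, segVal (rayOf mat dx dy c) L)) = (id : Int × Int → Int × Int) := rfl
      rw [hco, List.map_id]
    have hnodupAct : (actCells mat dx dy L).Nodup := (nodup_cellsRM mat).filter _
    have hnodupK : cur.keys.Nodup := by rw [hkeys]; exact hnodupAct
    have hgetSome : ∀ c' ∈ actCells mat dx dy L,
        cur.get? c' = some (segVal (rayOf mat dx dy c') L) := by
      intro c' hc'
      rw [PySem.Dict.get?_eq_some_iff_mem_items _ _ _ hnodupK, ih]
      exact List.mem_map_of_mem hc'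
    have hIsSome : ∀ c' : Int × Int,
        (cur.get? c').isSome = decide (c' ∈ actCells mat dx dy L) := by
      intro c'
      rw [← PySem.Dict.contains_eq_isSome_get?, PySem.Dict.contains_eq_decide_mem_keys, hkeys]
    -- unfold one DP step
    rw [iterFrom_succ_right, ← hcur]
    show (stepCur mat dx dy (1 * 10 ^ (L + 1)) cur).items = _
    unfold stepCur
    rw [stepCur_foldl_eq]
    have hfil : cur.items.filter
        (fun kv => (cur.get? (kv.1.1 + dx, kv.1.2 + dy)).isSome)
        = ((actCells mat dx dy L).filter
            (fun c => (cur.get? (c.1 + dx, c.2 + dy)).isSome)).map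
          (fun c => (c, segVal (rayOf mat dx dy c) L)) := by
      rw [ih, List.filter_map]
      rfl
    rw [hfil]
    have hnodupF : (((actCells mat dx dy L).filter
        (fun c => (cur.get? (c.1 + dx, c.2 + dy)).isSome)).map
          (fun c => (c, segVal (rayOf mat dx dy c) L))).map (·.1) |>.Nodup := by
      rw [List.map_map]
      simp only [Function.comp_def]
      have : (((actCells mat dx dy L).filter
          (fun c => (cur.get? (c.1 + dx, c.2 + dy)).isSome)).map (fun c => c)) =
          ((actCells mat dx dy L).filter
          (fun c => (cur.get? (c.1 + dx, c.2 + dy)).isSome)) := List.map_id _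
      rw [this]
      exact hnodupAct.filter _
    have hitems := PySem.Dict.items_foldl_insert_fresh
        (((actCells mat dx dy L).filter
            (fun c => (cur.get? (c.1 + dx, c.2 + dy)).isSome)).map
          (fun c => (c, segVal (rayOf mat dx dy c) L)))
        (·.1)
        (fun kv => matAt mat kv.1.1 kv.1.2 * (1 * 10 ^ (L + 1)) +
          (cur.get? (kv.1.1 + dx, kv.1.2 + dy)).getD 0)
        PySem.Dict.empty
        (fun a _ => PySem.Dict.contains_empty _) hnodupF
    rw [hitems]
    -- identify the filtered cell list with actCells (L+1)
    have hact : (actCells mat dx dy L).filter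
        (fun c => (cur.get? (c.1 + dx, c.2 + dy)).isSome) = actCells mat dx dy (L + 1) := by
      unfold actCells
      rw [List.filter_filter]
      apply List.filter_congr
      intro c hc
      have hb := mem_cellsRM.mp hc
      have hconsc := ray_cons mat hP hd hb
      have hlenc : (rayOf mat dx dy c).length
          = (rayOf mat dx dy (c.1 + dx, c.2 + dy)).length + 1 := by
        rw [hconsc]; simp
      rw [hIsSome]
      by_cases hnb : (c.1 + dx, c.2 + dy) ∈ cellsRM mat
      · have hmemAct : ((c.1 + dx, c.2 + dy) ∈ actCells mat dx dy L)
            ↔ L < (rayOf mat dx dy (c.1 + dx, c.2 + dy)).length := by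
          unfold actCells
          simp [List.mem_filter, hnb]
        by_cases hL : L < (rayOf mat dx dy (c.1 + dx, c.2 + dy)).length
        · simp [hmemAct, hL]; omega
        · simp [hmemAct, hL]; omega
      · have hnil : rayOf mat dx dy (c.1 + dx, c.2 + dy) = [] :=
          ray_out_nil mat (fun hb' => hnb (mem_cellsRM.mpr hb'))
        have : (c.1 + dx, c.2 + dy) ∉ actCells mat dx dy L := by
          unfold actCells
          rw [List.mem_filter]
          intro hmem
          exact hnb hmem.1
        rw [hnil] at hlenc
        simp only [List.length_nil] at hlenc
        simp [this, hlenc]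
    rw [List.map_map, hact]
    apply List.map_congr_left
    intro c hc
    have hcellc : c ∈ cellsRM mat := (List.mem_filter.mp hc).1
    have hlenc : L + 1 < (rayOf mat dx dy c).length := by
      have := (List.mem_filter.mp hc).2
      simpa using this
    have hb := mem_cellsRM.mp hcellc
    have hconsc := ray_cons mat hP hd hb
    have hlent : L < (rayOf mat dx dy (c.1 + dx, c.2 + dy)).length := by
      rw [hconsc] at hlenc
      simpa using hlenc
    have hnb : (c.1 + dx, c.2 + dy) ∈ cellsRM mat := by
      by_contra hnb
      rw [ray_out_nil mat (fun hb' => hnb (mem_cellsRM.mpr hb'))] at hlent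
      simp at hlent
    have hmemAct : (c.1 + dx, c.2 + dy) ∈ actCells mat dx dy L := by
      unfold actCells
      rw [List.mem_filter]
      exact ⟨hnb, by simpa using hlent⟩
    have hget := hgetSome _ hmemAct
    simp only [Function.comp_def, hget, Option.getD_some]
    have hseg : segVal (rayOf mat dx dy c) (L + 1)
        = matAt mat c.1 c.2 * 10 ^ (L + 1) + segVal (rayOf mat dx dy (c.1 + dx, c.2 + dy)) L := by
      rw [hconsc]
      exact segVal_succ _ _ _ hlent
    rw [hseg]
    ring_nf

-- ---- what the while-loop harvests ----
theorem loopB_eq_seq (mat : List (List Int)) (dx dy : Int) :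
    ∀ (fuel : Nat) (pow : Int) (cur : PySem.Dict (Int × Int) Int) (counts : PySem.Dict Int Int),
      loopB mat dx dy fuel pow cur counts
        = (seqOf mat dx dy fuel pow cur).foldl (fun c v => c.modify v 0 (· + 1)) counts := by
  intro fuel
  induction fuel with
  | zero => intro pow cur counts; rfl
  | succ fuel ih =>
    intro pow cur counts
    by_cases hemp : cur.items.isEmpty
    · simp only [loopB, seqOf, if_pos hemp, List.foldl_nil]
    · simp only [loopB, seqOf, if_neg hemp, List.foldl_append]
      rw [ih]
      congr 1
      rw [List.foldl_filter]
      apply PySem.List.foldl_congr_mem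
      intro c v _
      by_cases h : v > 10 <;> simp [h]

theorem seqOf_eq_range (mat : List (List Int)) (dx dy : Int) :
    ∀ (fuel : Nat) (pow : Int) (cur : PySem.Dict (Int × Int) Int),
      seqOf mat dx dy fuel pow cur
        = (List.range fuel).flatMap (fun L =>
            (iterFrom mat dx dy L pow cur).values.filter (fun v => decide (v > 10))) := by
  intro fuel
  induction fuel with
  | zero => intro pow cur; rfl
  | succ fuel ih =>
    intro pow cur
    by_cases hemp : cur.items.isEmpty
    · have hcur : cur = PySem.Dict.empty := by
        apply PySem.Dict.ext
        simpa [List.isEmpty_iff] using hemp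
      subst hcur
      simp only [seqOf, if_pos hemp]
      have : ∀ L ∈ List.range (fuel + 1),
          (iterFrom mat dx dy L pow PySem.Dict.empty).values.filter (fun v => decide (v > 10)) = [] := by
        intro L _
        rw [iterFrom_empty]
        rfl
      rw [List.flatMap_eq_nil_iff.mpr this]
    · simp only [seqOf, if_neg hemp]
      rw [ih, List.range_succ_eq_map, List.flatMap_cons, List.flatMap_map]
      rfl

def seqBAll (mat : List (List Int)) : List Int :=
  dirsA.flatMap (fun d => (List.range (kK mat)).flatMap (fun L =>
    (iterFrom mat d.1 d.2 L 1 (initCur mat (mI mat) (nI mat))).values.filter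
      (fun v => decide (v > 10))))

theorem countsB_eq (mat : List (List Int)) :
    dirsA.foldl (fun counts d =>
        loopB mat d.1 d.2 (kK mat) 1 (initCur mat (mI mat) (nI mat)) counts) PySem.Dict.empty
      = PySem.Dict.counter (seqBAll mat) := by
  rw [PySem.Dict.counter_eq_foldl]
  unfold seqBAll
  rw [List.foldl_flatMap]
  apply PySem.List.foldl_congr_mem
  intro counts d _
  rw [loopB_eq_seq, seqOf_eq_range, List.foldl_flatMap]

-- ---- multiset sums over index lists ----
theorem msum_nil {α : Type} (f : α → Multiset Int) : msum [] f = 0 := rfl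

theorem msum_cons {α : Type} (a : α) (l : List α) (f : α → Multiset Int) :
    msum (a :: l) f = f a + msum l f := by
  simp [msum]

theorem msum_append {α : Type} (l l' : List α) (f : α → Multiset Int) :
    msum (l ++ l') f = msum l f + msum l' f := by
  simp [msum]

theorem msum_congr {α : Type} {l : List α} {f g : α → Multiset Int}
    (h : ∀ a ∈ l, f a = g a) : msum l f = msum l g := by
  unfold msum
  rw [List.map_congr_left h]

theorem msum_zero {α : Type} (l : List α) : msum l (fun _ => (0 : Multiset Int)) = 0 := by
  induction l with
  | nil => rfl
  | cons a t ih => rw [msum_cons, ih, add_zero]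

theorem msum_add {α : Type} (l : List α) (f g : α → Multiset Int) :
    msum l (fun a => f a + g a) = msum l f + msum l g := by
  induction l with
  | nil => simp [msum_nil]
  | cons a t ih =>
    rw [msum_cons, msum_cons, msum_cons, ih]
    abel

theorem msum_comm {α β : Type} (l₁ : List α) (l₂ : List β) (g : α → β → Multiset Int) :
    msum l₁ (fun a => msum l₂ (g a)) = msum l₂ (fun b => msum l₁ (fun a => g a b)) := by
  induction l₁ with
  | nil => rw [msum_nil, ← msum_zero l₂]; rfl
  | cons a t ih =>
    rw [msum_cons, ih, ← msum_add]
    apply msum_congr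
    intro b _
    rw [msum_cons]

theorem msum_map {α β : Type} (l : List α) (h : α → β) (f : β → Multiset Int) :
    msum (l.map h) f = msum l (fun a => f (h a)) := by
  simp [msum, List.map_map, Function.comp_def]

theorem msum_flatMap {α β : Type} (l : List α) (g : α → List β) (f : β → Multiset Int) :
    msum (l.flatMap g) f = msum l (fun a => msum (g a) f) := by
  induction l with
  | nil => rfl
  | cons a t ih => rw [List.flatMap_cons, msum_append, msum_cons, ih]

theorem msum_filter {α : Type} (l : List α) (q : α → Bool) (f : α → Multiset Int) :
    msum (l.filter q) f = msum l (fun a => if q a then f a else 0) := by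
  induction l with
  | nil => rfl
  | cons a t ih =>
    rw [List.filter_cons]
    by_cases h : q a
    · rw [if_pos h, msum_cons, msum_cons, ih, if_pos h]
    · rw [if_neg h, ih, msum_cons, if_neg h, zero_add]

theorem coe_flatMap {α : Type} (l : List α) (f : α → List Int) :
    ((l.flatMap f : List Int) : Multiset Int) = msum l (fun a => ((f a : List Int) : Multiset Int)) := by
  induction l with
  | nil => rfl
  | cons a t ih =>
    rw [List.flatMap_cons, msum_cons, ← ih]
    simp

theorem coe_filter_map {α : Type} (l : List α) (f : α → Int) (p : Int → Bool) :
    (((l.map f).filter p : List Int) : Multiset Int)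
      = msum l (fun a => if p (f a) then ({f a} : Multiset Int) else 0) := by
  induction l with
  | nil => rfl
  | cons a t ih =>
    rw [List.map_cons, List.filter_cons]
    by_cases h : p (f a)
    · simp only [h, if_true]
      rw [msum_cons, ← ih]
      simp [h]
    · simp only [h, Bool.false_eq_true, if_false]
      rw [msum_cons, ← ih]
      simp [h]

theorem msum_pad (g : Nat → Multiset Int) :
    ∀ (K len : Nat), len ≤ K →
      msum (List.range len) g = msum (List.range K) (fun L => if L < len then g L else 0) := by
  intro K
  induction K with
  | zero => intro len h; interval_cases len; rfl
  | succ K ih =>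
    intro len h
    by_cases hlt : len ≤ K
    · rw [ih len hlt, List.range_succ, msum_append]
      have : msum [K] (fun L => if L < len then g L else 0) = 0 := by
        simp [msum]
        omega
      rw [this, add_zero]
    · have hlen : len = K + 1 := by omega
      subst hlen
      apply msum_congr
      intro L hL
      rw [List.mem_range] at hL
      rw [if_pos hL]

-- ---- prefix values as a map over range ----
theorem prefixNums_eq : ∀ (ds : List Int) (a : Int),
    prefixNums a ds = (List.range ds.length).map (fun L =>
      (ds.take (L + 1)).foldl (fun x v => x * 10 + v) a) := by
  intro ds
  induction ds with
  | nil => intro a; rfl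
  | cons v t ih =>
    intro a
    simp only [prefixNums, List.length_cons, List.range_succ_eq_map, List.map_cons, List.map_map]
    rw [ih (a * 10 + v)]
    refine List.cons_eq_cons.mpr ⟨by simp, ?_⟩
    apply List.map_congr_left
    intro L _
    simp [List.take_succ_cons]

-- ---- the two generated sequences as triple indicator sums ----
theorem coeB (mat : List (List Int)) (hP : Pre_mostFrequentPrime mat) :
    ((seqBAll mat : List Int) : Multiset Int)
      = msum dirsA (fun d => msum (List.range (kK mat)) (fun L =>
          msum (cellsRM mat) (fun c => indM mat d.1 d.2 c L))) := by
  unfold seqBAll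
  rw [coe_flatMap]
  apply msum_congr
  intro d hd
  obtain ⟨dx, dy⟩ := d
  have hdo := dir_shape hd
  rw [coe_flatMap]
  apply msum_congr
  intro L _
  have hvals : (iterFrom mat dx dy L 1 (initCur mat (mI mat) (nI mat))).values
      = (actCells mat dx dy L).map (fun c => segVal (rayOf mat dx dy c) L) := by
    show (iterFrom mat dx dy L 1 (initCur mat (mI mat) (nI mat))).items.map (·.2) = _
    rw [iter_items mat hP hdo L, List.map_map]
    rfl
  rw [hvals, coe_filter_map]
  unfold actCells
  rw [msum_filter]
  apply msum_congr
  intro c _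
  unfold indM
  by_cases h1 : L < (rayOf mat dx dy c).length
  · by_cases h2 : segVal (rayOf mat dx dy c) L > 10 <;> simp [h1, h2]
  · simp [h1]

theorem coeA (mat : List (List Int)) :
    ((bigSeq mat (mI mat) (nI mat) (fF mat) : List Int) : Multiset Int)
      = msum (cellsRM mat) (fun c => msum dirsA (fun d =>
          msum (List.range (kK mat)) (fun L => indM mat d.1 d.2 c L))) := by
  unfold bigSeq
  rw [coe_flatMap]
  conv_rhs => rw [cellsRM]
  rw [msum_flatMap]
  apply msum_congr
  intro i hi
  rw [coe_flatMap, msum_map]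
  apply msum_congr
  intro j hj
  rw [coe_flatMap]
  apply msum_congr
  intro d hd
  obtain ⟨dx, dy⟩ := d
  have hdo := dir_shape hd
  have hb : 0 ≤ ((i, j) : Int × Int).1 ∧ ((i, j) : Int × Int).1 < mI mat ∧
      0 ≤ ((i, j) : Int × Int).2 ∧ ((i, j) : Int × Int).2 < nI mat := by
    rw [PySem.List.mem_pyRange_one] at hi hj
    exact ⟨hi.1, hi.2, hj.1, hj.2⟩
  have hray : rayB mat (mI mat) (nI mat) dx dy (fF mat) i j = rayOf mat dx dy (i, j) := rfl
  rw [hray, prefixNums_eq, coe_filter_map]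
  have hlen : (rayOf mat dx dy (i, j)).length ≤ kK mat := by
    have := ray_len_le_K mat hdo hb
    unfold kK
    omega
  rw [msum_pad _ (kK mat) _ hlen]
  apply msum_congr
  intro L _
  unfold indM segVal
  by_cases h1 : L < (rayOf mat dx dy (i, j)).length
  · by_cases h2 :
      ((rayOf mat dx dy (i, j)).take (L + 1)).foldl (fun a v => a * 10 + v) 0 > 10 <;>
      simp [h1, h2]
  · simp [h1]

theorem swapAB (mat : List (List Int)) :
    msum (cellsRM mat) (fun c => msum dirsA (fun d =>
        msum (List.range (kK mat)) (fun L => indM mat d.1 d.2 c L)))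
      = msum dirsA (fun d => msum (List.range (kK mat)) (fun L =>
          msum (cellsRM mat) (fun c => indM mat d.1 d.2 c L))) := by
  rw [msum_comm (cellsRM mat) dirsA]
  apply msum_congr
  intro d _
  rw [msum_comm (cellsRM mat) (List.range (kK mat))]

-- ---- A's fused walk is a pure counting fold (cache invariant) ----
theorem walkA_pure (mat : List (List Int)) (m n dx dy : Int) :
    ∀ (fuel : Nat) (x y num : Int) (cache : PySem.Dict Int Bool) (freq : PySem.Dict Int Int),
    InvC cache →
    InvC (walkA mat m n dx dy fuel x y num cache freq).1 ∧
    (walkA mat m n dx dy fuel x y num cache freq).2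
      = ((prefixNums num (rayB mat m n dx dy fuel x y)).filter
          (fun v => isPrime v && decide (v > 10))).foldl
          (fun d v => d.modify v 0 (· + 1)) freq := by
  intro fuel
  induction fuel with
  | zero =>
    intro x y num cache freq hc
    exact ⟨hc, rfl⟩
  | succ fuel ih =>
    intro x y num cache freq hc
    by_cases hb : 0 ≤ x ∧ x < m ∧ 0 ≤ y ∧ y < n
    · cases hrow : PySem.List.pyGet? mat x with
      | none =>
        simp only [walkA, rayB, if_pos hb, hrow, prefixNums, List.filter_nil, List.foldl_nil]
        exact ⟨hc, trivial⟩
      | some row =>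
        cases hv : PySem.List.pyGet? row y with
        | none =>
          simp only [walkA, rayB, if_pos hb, hrow, hv, prefixNums, List.filter_nil, List.foldl_nil]
          exact ⟨hc, trivial⟩
        | some v =>
          simp only [walkA, rayB, if_pos hb, hrow, hv, prefixNums, List.filter_cons]
          by_cases h10 : num * 10 + v > 10
          · rw [if_pos h10]
            cases hcache : cache.get? (num * 10 + v) with
            | some p =>
              have hp : p = isPrime (num * 10 + v) := hc _ _ hcache
              obtain ⟨ih1, ih2⟩ := ih (x + dx) (y + dy) (num * 10 + v) cache
                (if p then freq.modify (num * 10 + v) 0 (· + 1) else freq) hc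
              refine ⟨ih1, ?_⟩
              rw [ih2]
              by_cases hpr : isPrime (num * 10 + v)
              · simp [h10, hpr, hp]
              · simp [h10, hpr, hp]
            | none =>
              have hc' : InvC (cache.insert (num * 10 + v) (isPrime (num * 10 + v))) := by
                intro k p hk
                by_cases hke : k = num * 10 + v
                · subst hke
                  rw [PySem.Dict.get?_insert_self] at hk
                  exact (Option.some.injEq _ _ ▸ hk).symm
                · rw [PySem.Dict.get?_insert_of_ne _ _ hke] at hk
                  exact hc _ _ hk
              obtain ⟨ih1, ih2⟩ := ih (x + dx) (y + dy) (num * 10 + v)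
                (cache.insert (num * 10 + v) (isPrime (num * 10 + v)))
                (if isPrime (num * 10 + v) then freq.modify (num * 10 + v) 0 (· + 1) else freq) hc'
              refine ⟨ih1, ?_⟩
              rw [ih2]
              by_cases hpr : isPrime (num * 10 + v)
              · simp [h10, hpr]
              · simp [h10, hpr]
          · rw [if_neg h10]
            obtain ⟨ih1, ih2⟩ := ih (x + dx) (y + dy) (num * 10 + v) cache freq hc
            refine ⟨ih1, ?_⟩
            rw [ih2]
            simp [h10]
    · simp only [walkA, rayB, if_neg hb, prefixNums, List.filter_nil, List.foldl_nil]
      exact ⟨hc, trivial⟩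

-- a fold whose second component evolves purely while an invariant on the first survives
theorem foldl_pair_pure {α γ δ : Type} (Inv : δ → Prop) (L : List α)
    (step : δ × γ → α → δ × γ) (g : γ → α → γ)
    (h : ∀ c f x, x ∈ L → Inv c → Inv (step (c, f) x).1 ∧ (step (c, f) x).2 = g f x) :
    ∀ c f, Inv c → Inv (L.foldl step (c, f)).1 ∧ (L.foldl step (c, f)).2 = L.foldl g f := by
  induction L with
  | nil => intro c f hc; exact ⟨hc, rfl⟩
  | cons x t ih =>
    intro c f hc
    have hx := h c f x (List.mem_cons_self) hc
    rcases hs : step (c, f) x with ⟨c', f'⟩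
    have h2 : f' = g f x := by rw [← hx.2, hs]
    have h1 : Inv c' := by have := hx.1; rwa [hs] at this
    simp only [List.foldl_cons, hs, h2]
    exact ih (fun c f y hy => h c f y (List.mem_cons_of_mem _ hy)) c' (g f x) h1

-- lexicographic (count, key) maximum step
def mstep (a x : Int × Int) : Int × Int :=
  if x.2 > a.2 ∨ (x.2 = a.2 ∧ x.1 > a.1) then x else a

def domP (a x : Int × Int) : Prop := x.2 < a.2 ∨ (x.2 = a.2 ∧ x.1 ≤ a.1)

theorem selB_eq : ∀ (l : List (Int × Int)) (b f : Int),
    selB l b f = (List.foldl mstep (b, f) (l.filter (fun kc => isPrime kc.1))).1 := by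
  intro l
  induction l with
  | nil => intro b f; rfl
  | cons kc t ih =>
    intro b f
    obtain ⟨k, c⟩ := kc
    by_cases hp : isPrime k
    · simp only [selB, List.filter_cons, hp, if_true, Bool.true_and, List.foldl_cons]
      by_cases hcond : c > f ∨ (c = f ∧ k > b)
      · have hbool : (decide (c > f) || (c == f && decide (k > b))) = true := by
          rcases hcond with hgt | ⟨h1, h2⟩
          · simp [hgt]
          · simp [h1, h2]
        have hms : mstep (b, f) (k, c) = (k, c) := by
          unfold mstep; exact if_pos (by simpa using hcond)
        rw [hbool, hms, if_pos rfl, ih]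
      · have hbool : (decide (c > f) || (c == f && decide (k > b))) = false := by
          by_cases h1 : c = f
          · have hk : ¬ k > b := by omega
            simp [h1, hk]
          · have hle : ¬ c > f := by omega
            simp [hle, h1]
        have hms : mstep (b, f) (k, c) = (b, f) := by
          unfold mstep; exact if_neg (by simpa using hcond)
        rw [hbool, hms]
        simp only [Bool.false_eq_true, if_false]
        exact ih b f
    · simp only [selB, List.filter_cons, hp, Bool.false_and, if_false, Bool.false_eq_true]
      exact ih b f

theorem foldl_mstep_mem : ∀ (l : List (Int × Int)) (a : Int × Int),
    List.foldl mstep a l = a ∨ List.foldl mstep a l ∈ l := by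
  intro l
  induction l with
  | nil => intro a; exact Or.inl rfl
  | cons x t ih =>
    intro a
    simp only [List.foldl_cons]
    rcases ih (mstep a x) with h | h
    · rw [h]
      unfold mstep
      split_ifs with hc
      · exact Or.inr (List.mem_cons_self)
      · exact Or.inl rfl
    · exact Or.inr (List.mem_cons_of_mem _ h)

theorem foldl_mstep_dom : ∀ (l : List (Int × Int)) (a : Int × Int),
    domP (List.foldl mstep a l) a ∧ ∀ x ∈ l, domP (List.foldl mstep a l) x := by
  intro l
  induction l with
  | nil => intro a; exact ⟨Or.inr ⟨rfl, le_refl _⟩, by simp⟩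
  | cons x t ih =>
    intro a
    simp only [List.foldl_cons]
    obtain ⟨h1, h2⟩ := ih (mstep a x)
    have hda : domP (mstep a x) a := by unfold mstep domP; split_ifs with hc <;> omega
    have hdx : domP (mstep a x) x := by unfold mstep domP; split_ifs with hc <;> omega
    have htrans : ∀ u v w : Int × Int, domP u v → domP v w → domP u w := by
      intro u v w h1 h2; unfold domP at *; omega
    refine ⟨htrans _ _ _ h1 hda, ?_⟩
    intro y hy
    rcases List.mem_cons.mp hy with rfl | hy
    · exact htrans _ _ _ h1 hdx
    · exact h2 y hy

theorem ofList_filter_aux (p : Int → Bool) : ∀ (l acc : List Int),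
    List.foldl PySem.Set.add (acc.filter p) (l.filter p)
      = (List.foldl PySem.Set.add acc l).filter p := by
  intro l
  induction l with
  | nil => intro acc; rfl
  | cons x t ih =>
    intro acc
    simp only [List.filter_cons, List.foldl_cons]
    by_cases hp : p x
    · simp only [hp, if_true, List.foldl_cons]
      have hadd : PySem.Set.add (acc.filter p) x = (PySem.Set.add acc x).filter p := by
        unfold PySem.Set.add
        by_cases hmem : x ∈ acc
        · simp [List.mem_filter, hmem, hp]
        · simp [List.mem_filter, hmem, List.filter_append, hp]
      rw [hadd, ih]
    · simp only [hp, Bool.false_eq_true, if_false]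
      have hadd : acc.filter p = (PySem.Set.add acc x).filter p := by
        unfold PySem.Set.add
        split_ifs
        · rfl
        · simp [List.filter_append, hp]
      rw [hadd, ih]

theorem ofList_filter (p : Int → Bool) (l : List Int) :
    PySem.Set.ofList (l.filter p) = (PySem.Set.ofList l).filter p := by
  have := ofList_filter_aux p l []
  simpa [PySem.Set.ofList] using this

-- A's tail (max frequency, then max key among candidates) equals B's selection pass
theorem final_eq (s : List Int) :
    (if (PySem.Dict.counter (s.filter (fun v => isPrime v)) : PySem.Dict Int Int).items.isEmpty then (-1 : Int)
     else
       match PySem.List.max? (PySem.Dict.counter (s.filter (fun v => isPrime v)) : PySem.Dict Int Int).values (fun v => v) with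
       | none => -1
       | some mf =>
         match PySem.List.max?
             (((PySem.Dict.counter (s.filter (fun v => isPrime v)) : PySem.Dict Int Int).items.filter
               (fun kc => kc.2 == mf)).map (·.1)) (fun v => v) with
         | some r => r
         | none => -1)
    = selB (PySem.Dict.counter s).items (-1) 0 := by
  rw [selB_eq]
  have hfilter : ((PySem.Dict.counter s : PySem.Dict Int Int).items.filter (fun kc => isPrime kc.1))
      = (PySem.Dict.counter (s.filter (fun v => isPrime v)) : PySem.Dict Int Int).items := by
    rw [PySem.Dict.items_counter, PySem.Dict.items_counter, List.filter_map, ofList_filter]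
    simp only [Function.comp_def]
    apply List.map_eq_map_iff.mpr
    intro k hk
    have hp : isPrime k = true := by
      have := (List.mem_filter.mp hk).2
      simpa using this
    simp [List.count_filter, hp]
  rw [hfilter]
  set dA := (PySem.Dict.counter (s.filter (fun v => isPrime v)) : PySem.Dict Int Int) with hdA
  have hitemsA : dA.items = (PySem.Set.ofList (s.filter (fun v => isPrime v))).map
      (fun k => (k, ((s.filter (fun v => isPrime v)).count k : Int))) := PySem.Dict.items_counter _
  have hpos : ∀ x ∈ dA.items, (1 : Int) ≤ x.2 := by
    intro x hx
    rw [hitemsA] at hx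
    obtain ⟨k, hk, rfl⟩ := List.mem_map.mp hx
    have hkmem : k ∈ s.filter (fun v => isPrime v) := by
      rwa [PySem.Set.mem_ofList] at hk
    have hcp := List.count_pos_iff.mpr hkmem
    simp only []
    exact_mod_cast hcp
  by_cases hnil : dA.items = []
  · simp [hnil]
  · have hemp : dA.items.isEmpty = false := by simpa [List.isEmpty_iff] using hnil
    rcases foldl_mstep_mem dA.items (-1, 0) with hpm | hpm
    · exfalso
      obtain ⟨x, hx⟩ := List.exists_mem_of_ne_nil _ hnil
      have hd := (foldl_mstep_dom dA.items (-1, 0)).2 x hx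
      rw [hpm] at hd
      have := hpos x hx
      unfold domP at hd
      omega
    · have hvne : dA.items.map (fun kc => kc.2) ≠ [] := by simpa using hnil
      obtain ⟨mf, hmf⟩ : ∃ mf, PySem.List.max? dA.values (fun v => v) = some mf := by
        cases h : PySem.List.max? dA.values (fun v => v) with
        | none =>
          exfalso
          have := (PySem.List.max?_eq_none_iff _ _).mp h
          exact hvne (by simpa [PySem.Dict.values] using this)
        | some mf => exact ⟨mf, rfl⟩
      have hvals : dA.values = dA.items.map (fun kc => kc.2) := by
        simp [PySem.Dict.values]
      have hmfmem : mf ∈ dA.items.map (fun kc => kc.2) := by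
        rw [← hvals]; exact PySem.List.max?_mem hmf
      have hmfmax : ∀ y ∈ dA.items.map (fun kc => kc.2), y ≤ mf := by
        rw [← hvals]; exact fun y hy => PySem.List.max?_isMax hmf y hy
      obtain ⟨r, hr⟩ : ∃ r, PySem.List.max?
          ((dA.items.filter (fun kc => kc.2 == mf)).map (·.1)) (fun v => v) = some r := by
        cases h : PySem.List.max? ((dA.items.filter (fun kc => kc.2 == mf)).map (·.1)) (fun v => v) with
        | none =>
          exfalso
          have hnone := (PySem.List.max?_eq_none_iff _ _).mp h
          obtain ⟨x, hx, hx2⟩ := List.mem_map.mp hmfmem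
          have hxf : x ∈ dA.items.filter (fun kc => kc.2 == mf) :=
            List.mem_filter.mpr ⟨hx, by simp [hx2]⟩
          have : x.1 ∈ (dA.items.filter (fun kc => kc.2 == mf)).map (·.1) :=
            List.mem_map_of_mem hxf
          rw [hnone] at this
          exact absurd this (List.not_mem_nil)
        | some r => exact ⟨r, rfl⟩
      have hrmem := PySem.List.max?_mem hr
      have hrmax : ∀ y ∈ (dA.items.filter (fun kc => kc.2 == mf)).map (·.1), y ≤ r :=
        fun y hy => PySem.List.max?_isMax hr y hy
      obtain ⟨xc, hxc, hxc1⟩ := List.mem_map.mp hrmem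
      have hxcl : xc ∈ dA.items := (List.mem_filter.mp hxc).1
      have hxc2 : xc.2 = mf := by
        have := (List.mem_filter.mp hxc).2
        simpa using this
      have hdomA : ∀ x ∈ dA.items, domP xc x := by
        intro x hx
        have h2 : x.2 ≤ mf := hmfmax _ (List.mem_map_of_mem hx)
        unfold domP
        by_cases he : x.2 = mf
        · have hxf : x ∈ dA.items.filter (fun kc => kc.2 == mf) :=
            List.mem_filter.mpr ⟨hx, by simp [he]⟩
          have h1 : x.1 ≤ r := hrmax _ (List.mem_map_of_mem hxf)
          omega
        · omega
      have hdomP1 : domP (List.foldl mstep (-1, 0) dA.items) xc :=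
        (foldl_mstep_dom dA.items (-1, 0)).2 xc hxcl
      have hdomP2 : domP xc (List.foldl mstep (-1, 0) dA.items) := hdomA _ hpm
      have heq : (List.foldl mstep (-1, 0) dA.items).1 = xc.1 := by
        unfold domP at hdomP1 hdomP2
        omega
      rw [hemp]
      simp only [Bool.false_eq_true, if_false, hmf, hr]
      rw [heq, hxc1]

-- A's loop nest produces the counter of the prime-filtered generated sequence
theorem loopsA_eq (mat : List (List Int)) (m n : Int) (fuel : Nat) :
    ((PySem.List.pyRange 0 m 1).foldl (fun st i =>
      (PySem.List.pyRange 0 n 1).foldl (fun st j =>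
        dirsA.foldl (fun st d =>
          walkA mat m n d.1 d.2 fuel i j 0 st.1 st.2) st) st)
      ((PySem.Dict.empty : PySem.Dict Int Bool), (PySem.Dict.empty : PySem.Dict Int Int))).2
    = PySem.Dict.counter ((bigSeq mat m n fuel).filter (fun v => isPrime v)) := by
  have hempty : InvC PySem.Dict.empty := by
    intro k p hk
    simp [pysem] at hk
  have h3 : ∀ (i j : Int) (cache : PySem.Dict Int Bool) (freq : PySem.Dict Int Int), InvC cache →
      InvC ((dirsA.foldl (fun st d => walkA mat m n d.1 d.2 fuel i j 0 st.1 st.2) (cache, freq))).1 ∧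
      (dirsA.foldl (fun st d => walkA mat m n d.1 d.2 fuel i j 0 st.1 st.2) (cache, freq)).2
        = dirsA.foldl (fun f d =>
            ((prefixNums 0 (rayB mat m n d.1 d.2 fuel i j)).filter
              (fun v => isPrime v && decide (v > 10))).foldl
              (fun dd v => dd.modify v 0 (· + 1)) f) freq := by
    intro i j cache freq hcc
    exact foldl_pair_pure InvC dirsA _ _
      (fun c f d _ hc => walkA_pure mat m n d.1 d.2 fuel i j 0 c f hc) cache freq hcc
  have h2 : ∀ (i : Int) (cache : PySem.Dict Int Bool) (freq : PySem.Dict Int Int), InvC cache →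
      InvC (((PySem.List.pyRange 0 n 1).foldl (fun st j =>
          dirsA.foldl (fun st d => walkA mat m n d.1 d.2 fuel i j 0 st.1 st.2) st) (cache, freq))).1 ∧
      ((PySem.List.pyRange 0 n 1).foldl (fun st j =>
          dirsA.foldl (fun st d => walkA mat m n d.1 d.2 fuel i j 0 st.1 st.2) st) (cache, freq)).2
        = (PySem.List.pyRange 0 n 1).foldl (fun f j =>
            dirsA.foldl (fun f d =>
              ((prefixNums 0 (rayB mat m n d.1 d.2 fuel i j)).filter
                (fun v => isPrime v && decide (v > 10))).foldl
                (fun dd v => dd.modify v 0 (· + 1)) f) f) freq := by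
    intro i cache freq hcc
    exact foldl_pair_pure InvC (PySem.List.pyRange 0 n 1) _ _
      (fun c f j _ hc => h3 i j c f hc) cache freq hcc
  have h1 := foldl_pair_pure InvC (PySem.List.pyRange 0 m 1)
      (fun st i => (PySem.List.pyRange 0 n 1).foldl (fun st j =>
          dirsA.foldl (fun st d => walkA mat m n d.1 d.2 fuel i j 0 st.1 st.2) st) st)
      (fun f i => (PySem.List.pyRange 0 n 1).foldl (fun f j =>
            dirsA.foldl (fun f d =>
              ((prefixNums 0 (rayB mat m n d.1 d.2 fuel i j)).filter
                (fun v => isPrime v && decide (v > 10))).foldl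
                (fun dd v => dd.modify v 0 (· + 1)) f) f) f)
      (fun c f i _ hc => h2 i c f hc) PySem.Dict.empty PySem.Dict.empty hempty
  rw [h1.2, PySem.Dict.counter_eq_foldl]
  unfold bigSeq
  simp only [List.filter_flatMap, List.filter_filter, List.foldl_flatMap]

-- ---- the selection pass only depends on the membership of the counted items ----
theorem domP_antisymm {x y : Int × Int} (h1 : domP x y) (h2 : domP y x) : x = y := by
  unfold domP at h1 h2
  have hx : x.1 = y.1 ∧ x.2 = y.2 := by omega
  exact Prod.ext_iff.mpr hx

theorem sel_mem_eq (l l' : List (Int × Int)) (h : ∀ x, x ∈ l ↔ x ∈ l') :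
    List.foldl mstep (-1, 0) l = List.foldl mstep (-1, 0) l' := by
  have d1 := foldl_mstep_dom l (-1, 0)
  have d2 := foldl_mstep_dom l' (-1, 0)
  have m1 := foldl_mstep_mem l (-1, 0)
  have m2 := foldl_mstep_mem l' (-1, 0)
  apply domP_antisymm
  · rcases m2 with h2 | h2
    · rw [h2]; exact d1.1
    · exact d1.2 _ ((h _).mpr h2)
  · rcases m1 with h1 | h1
    · rw [h1]; exact d2.1
    · exact d2.2 _ ((h _).mp h1)

theorem selB_counter_perm (s s' : List Int) (hp : s.Perm s') :
    selB (PySem.Dict.counter s : PySem.Dict Int Int).items (-1) 0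
      = selB (PySem.Dict.counter s' : PySem.Dict Int Int).items (-1) 0 := by
  rw [selB_eq, selB_eq]
  have hmem : ∀ x : Int × Int,
      x ∈ (PySem.Dict.counter s : PySem.Dict Int Int).items
        ↔ x ∈ (PySem.Dict.counter s' : PySem.Dict Int Int).items := by
    intro x
    rw [PySem.Dict.items_counter, PySem.Dict.items_counter]
    simp only [List.mem_map, PySem.Set.mem_ofList]
    constructor
    · rintro ⟨k, hk, rfl⟩
      exact ⟨k, hp.subset hk, by rw [hp.count_eq]⟩
    · rintro ⟨k, hk, rfl⟩
      exact ⟨k, hp.symm.subset hk, by rw [hp.count_eq]⟩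
  apply congrArg Prod.fst
  apply sel_mem_eq
  intro x
  rw [List.mem_filter, List.mem_filter, hmem]

-- ===== VERDICT (by name: the statement is the Claim_ definition above) =====
theorem mostFrequentPrime_spec : Claim_equal_mostFrequentPrime := by
  intro mat _ hP
  show mostFrequentPrime mat = mostFrequentPrime_alt mat
  have hA : mostFrequentPrime mat
      = selB (PySem.Dict.counter (bigSeq mat (mI mat) (nI mat) (fF mat)) : PySem.Dict Int Int).items (-1) 0 := by
    unfold mostFrequentPrime
    simp only [loopsA_eq]
    exact final_eq _
  have hB : mostFrequentPrime_alt mat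
      = selB (PySem.Dict.counter (seqBAll mat) : PySem.Dict Int Int).items (-1) 0 := by
    show selB (dirsA.foldl (fun counts d =>
        loopB mat d.1 d.2 (kK mat) 1 (initCur mat (mI mat) (nI mat)) counts)
        PySem.Dict.empty).items (-1) 0 = _
    rw [countsB_eq]
  have hperm : (bigSeq mat (mI mat) (nI mat) (fF mat)).Perm (seqBAll mat) := by
    apply Multiset.coe_eq_coe.mp
    rw [coeA mat, swapAB, ← coeB mat hP]
  rw [hA, hB]
  exact selB_counter_perm _ _ hperm
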